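-- pv_equiv track=rewrite | github.com/danieltanner44/Python_Programming | Advent_of_Code/Advent_of_Code_2024/Day2/main_part12.py | assess_report
-- ===== SOURCE A (Python) =====
-- def assess_report(report):
--     levels_increasing, levels_decreasing = False, False  # Assume false and check
--     adjacent_levels_in_range = True  # Assume true and check
--
--     if sorted(report) == report:  # Check if increasing
--         levels_increasing = True
--     elif sorted(report, reverse=True) == report:  # Check if decreasing
--         levels_decreasing = True
--     for i in range(len(report) - 1):  # Check if step to adjacent levels in range
--         if abs(report[i] - report[i + 1]) < 1 or abs(report[i] - report[i + 1]) > 3:  # Check reports out of range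
--             adjacent_levels_in_range = False
--
--     # Now check if one condition is met
--     if (levels_increasing or levels_decreasing) and adjacent_levels_in_range:
--         outcome = "Safe"
--     else:
--         outcome = "Unsafe"
--     return outcome
-- ===== SOURCE B (Python) =====
-- def assess_report(report):
--     diffs = [b - a for a, b in zip(report, report[1:])]
--     if all(1 <= d <= 3 for d in diffs) or all(-3 <= d <= -1 for d in diffs):
--         return "Safe"
--     return "Unsafe"
-- ===== Notes on version B (the rewrite author's own statement) =====
-- stated objective: faster
-- what changed: A sorts the list twice (and re-sorts in reverse) to test monotonicity and then runs a separate index loop over adjacent steps; B makes a single pass over the zipped adjacent differences, testing both direction and step range at once.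
import Mathlib
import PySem

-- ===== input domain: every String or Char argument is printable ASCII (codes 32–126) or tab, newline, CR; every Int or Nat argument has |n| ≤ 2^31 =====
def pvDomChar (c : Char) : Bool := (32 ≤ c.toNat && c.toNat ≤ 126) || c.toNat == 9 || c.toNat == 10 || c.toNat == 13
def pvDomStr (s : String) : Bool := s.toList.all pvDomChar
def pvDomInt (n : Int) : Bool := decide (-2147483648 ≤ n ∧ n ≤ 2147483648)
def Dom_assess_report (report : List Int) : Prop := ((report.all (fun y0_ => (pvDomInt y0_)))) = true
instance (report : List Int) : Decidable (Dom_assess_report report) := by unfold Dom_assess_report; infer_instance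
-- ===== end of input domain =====

-- B replaces A's two sorts by one pass over adjacent differences; same return value, proved below (neither version mutates its argument).

-- ===== PORT A =====
def assess_report (report : List Int) : String :=
  -- levels_increasing, levels_decreasing = False, False ; adjacent_levels_in_range = True
  -- if sorted(report) == report: … elif sorted(report, reverse=True) == report: …
  let levels_increasing : Bool := decide (PySem.List.sorted report (fun x => x) = report)
  let levels_decreasing : Bool :=
    if levels_increasing then false
    else decide (PySem.List.sorted report (fun x => x) true = report)
  -- for i in range(len(report) - 1): indices are always in range, so pyGetD's default is never read
  let adjacent_levels_in_range : Bool :=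
    (PySem.List.pyRange 0 ((report.length : Int) - 1) 1).foldl
      (fun acc i =>
        if |PySem.List.pyGetD report i 0 - PySem.List.pyGetD report (i + 1) 0| < 1 ∨
           |PySem.List.pyGetD report i 0 - PySem.List.pyGetD report (i + 1) 0| > 3
        then false else acc) true
  if (levels_increasing || levels_decreasing) && adjacent_levels_in_range then "Safe" else "Unsafe"

-- ===== PORT B =====
def assess_report_alt (report : List Int) : String :=
  -- diffs = [b - a for a, b in zip(report, report[1:])]  (report[1:] = drop 1, cf. PySem.List.slice_from)
  let diffs : List Int := (report.zip (report.drop 1)).map (fun p => p.2 - p.1)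
  if diffs.all (fun d => decide (1 ≤ d ∧ d ≤ 3)) || diffs.all (fun d => decide (-3 ≤ d ∧ d ≤ -1))
  then "Safe" else "Unsafe"

-- ===== PRECONDITION & SPEC =====
def Spec_assess_report (report : List Int) (out : String) : Prop := out = assess_report_alt report
instance (report : List Int) (out : String) : Decidable (Spec_assess_report report out) := by unfold Spec_assess_report; infer_instance

-- ===== CLAIM (what is proved, stated in full; the proofs are below) =====
def Claim_equal_assess_report : Prop := ∀ (report : List Int), Dom_assess_report report → Spec_assess_report report (assess_report report)

-- ===== LEMMAS AND PROOFS =====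

-- A's flag-clearing loop is 'b && all'
theorem foldl_flag (P : Int → Prop) [DecidablePred P] (l : List Int) (b : Bool) :
    l.foldl (fun acc i => if P i then false else acc) b = (b && l.all (fun i => !(decide (P i)))) := by
  induction l generalizing b with
  | nil => simp
  | cons x xs ih =>
    rw [List.foldl_cons, List.all_cons, ih]
    by_cases h : P x
    · simp [h]
    · simp [h]

-- an all over range(len-1) reading l[i], l[i+1] is an all over the adjacent pairs
theorem all_range_getD_cons (q : Int → Int → Bool) (xs : List Int) : ∀ (x : Int),
    (List.range xs.length).all (fun k => q ((x :: xs).getD k 0) ((x :: xs).getD (k + 1) 0))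
      = ((x :: xs).zip xs).all (fun p => q p.1 p.2) := by
  induction xs with
  | nil => intro x; simp
  | cons y t ih =>
    intro x
    simp only [List.length_cons, List.range_succ_eq_map, List.all_cons, List.all_map,
      List.getD_cons_zero, List.getD_cons_succ, List.zip_cons_cons, Function.comp_def]
    simp only [List.getD_cons_succ] at ih
    rw [ih y]

theorem all_range_adj (q : Int → Int → Bool) (l : List Int) :
    ((PySem.List.pyRange 0 ((l.length : Int) - 1) 1).all
       (fun i => q (PySem.List.pyGetD l i 0) (PySem.List.pyGetD l (i + 1) 0)))
      = (l.zip (l.drop 1)).all (fun p => q p.1 p.2) := by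
  cases l with
  | nil => simp [PySem.List.pyRange]
  | cons x xs =>
    rw [show ((x :: xs).length : Int) - 1 = (xs.length : Int) by simp,
      PySem.List.pyRange_zero_natCast, List.all_map]
    have h : ((fun i => q (PySem.List.pyGetD (x :: xs) i 0) (PySem.List.pyGetD (x :: xs) (i + 1) 0))
          ∘ (fun k : Nat => (k : Int)))
        = fun k => q ((x :: xs).getD k 0) ((x :: xs).getD (k + 1) 0) := by
      funext k
      simp only [Function.comp_apply]
      rw [show ((k : Int) + 1) = ((k + 1 : Nat) : Int) by push_cast; ring,
        PySem.List.pyGetD_natCast, PySem.List.pyGetD_natCast]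
    rw [h, all_range_getD_cons q xs x]
    rfl

-- adjacent-pair all ↔ chain (and hence ↔ Pairwise, for a transitive relation)
theorem pairsAll_iff_chain (r : Int → Int → Prop) [DecidableRel r] (l : List Int) :
    ((l.zip (l.drop 1)).all (fun p => decide (r p.1 p.2)) = true) ↔ List.IsChain r l := by
  induction l with
  | nil => simp
  | cons x xs ih =>
    cases xs with
    | nil => simp
    | cons y t =>
      rw [List.isChain_cons_cons, ← ih]
      simp

theorem sorted_id_eq_iff (l : List Int) :
    PySem.List.sorted l (fun x => x) = l ↔ l.Pairwise (· ≤ ·) :=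
  ⟨fun h => h ▸ PySem.List.sorted_pairwise l _, PySem.List.sorted_eq_self_of_pairwise l _⟩

theorem sorted_rev_id_eq_iff (l : List Int) :
    PySem.List.sorted l (fun x => x) true = l ↔ l.Pairwise (fun a b => b ≤ a) :=
  ⟨fun h => h ▸ PySem.List.sorted_pairwise_rev l _, PySem.List.sorted_rev_eq_self_of_pairwise l _⟩

-- the two Safe-conditions agree, pointwise on the adjacent pairs
theorem cond_eq (l : List Int) :
    (((decide (PySem.List.sorted l (fun x => x) = l)) ||
        (if (decide (PySem.List.sorted l (fun x => x) = l) : Bool) then false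
         else decide (PySem.List.sorted l (fun x => x) true = l))) &&
      (l.zip (l.drop 1)).all (fun p => !decide (|p.1 - p.2| < 1 ∨ |p.1 - p.2| > 3)))
    = (((l.zip (l.drop 1)).map (fun p => p.2 - p.1)).all (fun d => decide (1 ≤ d ∧ d ≤ 3)) ||
       ((l.zip (l.drop 1)).map (fun p => p.2 - p.1)).all (fun d => decide (-3 ≤ d ∧ d ≤ -1))) := by
  apply Bool.coe_iff_coe.mp
  rw [show ∀ a b : Bool, (a || (if a then false else b)) = (a || b) by intro a b; cases a <;> simp]
  simp only [Bool.and_eq_true, Bool.or_eq_true, decide_eq_true_eq, List.all_map,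
    List.all_eq_true, Bool.not_eq_eq_eq_not, Bool.not_true, decide_eq_false_iff_not,
    Function.comp_def, sorted_id_eq_iff, sorted_rev_id_eq_iff, ← List.isChain_iff_pairwise]
  rw [show (List.IsChain (fun a b : Int => a ≤ b) l) ↔
        ∀ p ∈ l.zip (l.drop 1), p.1 ≤ p.2 from by
      rw [← pairsAll_iff_chain (fun a b : Int => a ≤ b) l]; simp [List.all_eq_true],
    show (List.IsChain (fun a b : Int => b ≤ a) l) ↔
        ∀ p ∈ l.zip (l.drop 1), p.2 ≤ p.1 from by
      rw [← pairsAll_iff_chain (fun a b : Int => b ≤ a) l]; simp [List.all_eq_true]]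
  constructor
  · rintro ⟨hmono | hmono, hr⟩
    · left; intro p hp
      have h1 := hmono p hp; have h2 := hr p hp
      rcases abs_cases (p.1 - p.2) with ⟨he, _⟩ | ⟨he, _⟩ <;> rw [he] at h2 <;> omega
    · right; intro p hp
      have h1 := hmono p hp; have h2 := hr p hp
      rcases abs_cases (p.1 - p.2) with ⟨he, _⟩ | ⟨he, _⟩ <;> rw [he] at h2 <;> omega
  · rintro (hb | hb)
    · refine ⟨Or.inl fun p hp => by have := hb p hp; omega, fun p hp => ?_⟩
      have := hb p hp
      rcases abs_cases (p.1 - p.2) with ⟨he, _⟩ | ⟨he, _⟩ <;> rw [he] <;> omega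
    · refine ⟨Or.inr fun p hp => by have := hb p hp; omega, fun p hp => ?_⟩
      have := hb p hp
      rcases abs_cases (p.1 - p.2) with ⟨he, _⟩ | ⟨he, _⟩ <;> rw [he] <;> omega

-- ===== VERDICT (by name: the statement is the Claim_ definition above) =====
theorem assess_report_spec : Claim_equal_assess_report := by
  intro report _
  show assess_report report = assess_report_alt report
  unfold assess_report assess_report_alt
  rw [show (fun (acc : Bool) (i : Int) =>
        if |PySem.List.pyGetD report i 0 - PySem.List.pyGetD report (i + 1) 0| < 1 ∨
           |PySem.List.pyGetD report i 0 - PySem.List.pyGetD report (i + 1) 0| > 3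
        then false else acc)
      = (fun (acc : Bool) (i : Int) =>
        if (fun j => |PySem.List.pyGetD report j 0 - PySem.List.pyGetD report (j + 1) 0| < 1 ∨
           |PySem.List.pyGetD report j 0 - PySem.List.pyGetD report (j + 1) 0| > 3) i
        then false else acc) from rfl,
    foldl_flag, Bool.true_and,
    all_range_adj (fun a b => !decide (|a - b| < 1 ∨ |a - b| > 3)) report]
  dsimp only
  rw [cond_eq]
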